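-- pv_equiv track=rewrite | github.com/GoldieLeGenie/dragon-quest-V-save-editor | dqVsaveEditor/save_decrypt.py | calculate_final_key
-- ===== SOURCE A (Python) =====
-- def calculate_final_key(key: int, password: str) -> int:
--     final_key = 0
--     if password:
--         temp_key = 0xFFFFFFFF
--         for char in password:
--             intermediate_key = temp_key ^ ord(char)
--             for _ in range(8):
--                 temp_key = key ^ (intermediate_key >> 1)
--                 if (intermediate_key & 1) == 0:
--                     temp_key = intermediate_key >> 1
--                 intermediate_key = temp_key
--         final_key = ~temp_key & 0xFFFFFFFF
--     return final_key
-- ===== SOURCE B (Python) =====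
-- def calculate_final_key(key: int, password: str) -> int:
--     if not password:
--         return 0
--     # 256-entry table: T[b] = the 8-step bit transform applied to byte b
--     table = []
--     for b in range(256):
--         i = b
--         for _ in range(8):
--             if i & 1:
--                 i = key ^ (i >> 1)
--             else:
--                 i >>= 1
--         table.append(i)
--     temp = 0xFFFFFFFF
--     for ch in password:
--         x = temp ^ ord(ch)
--         temp = (x >> 8) ^ table[x & 0xFF]
--     return ~temp & 0xFFFFFFFF
-- ===== Notes on version B (the rewrite author's own statement) =====
-- stated objective: faster
-- what changed: Replaced A's per-character 8-iteration bit loop by a precomputed 256-entry byte table (classic table-driven CRC form): temp is updated per character as (x >> 8) ^ T[x & 0xff], exact because the shift/xor step is GF(2)-linear.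
import Mathlib
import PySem

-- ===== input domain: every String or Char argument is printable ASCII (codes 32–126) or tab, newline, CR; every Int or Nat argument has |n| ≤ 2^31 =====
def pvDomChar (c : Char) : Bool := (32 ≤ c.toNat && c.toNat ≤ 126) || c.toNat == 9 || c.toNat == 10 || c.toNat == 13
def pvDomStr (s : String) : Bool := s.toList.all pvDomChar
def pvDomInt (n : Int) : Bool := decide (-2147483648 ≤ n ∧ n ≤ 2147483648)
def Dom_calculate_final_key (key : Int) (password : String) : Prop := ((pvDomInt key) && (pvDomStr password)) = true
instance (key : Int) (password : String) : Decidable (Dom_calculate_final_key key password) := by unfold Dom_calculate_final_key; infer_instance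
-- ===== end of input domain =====

-- B replaces A's per-character 8-step inner loop by a 256-entry table indexed by the low
-- byte (CRC-style), exact because the step is GF(2)-linear; same return value, measured faster.

-- ===== PORT A =====
def calculate_final_key (key : Int) (password : String) : Int :=
  if password.toList = [] then 0
  else
    let temp_key : Int :=
      password.toList.foldl (fun temp_key char =>
        let intermediate_key := PySem.Int.bxor temp_key ((char.toNat : Int))
        let st := (List.range 8).foldl (fun (st : Int × Int) _ =>
          let t := PySem.Int.bxor key (st.2 >>> (1 : Nat))
          let t := if PySem.Int.band st.2 1 = 0 then st.2 >>> (1 : Nat) else t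
          (t, t)) (temp_key, intermediate_key)
        st.1) 0xFFFFFFFF
    PySem.Int.band (Int.not temp_key) 0xFFFFFFFF

-- ===== PORT B =====
-- one iteration of the inner transform (Source B's if/else)
def cfkStep (key : Int) (i : Int) : Int :=
  if PySem.Int.band i 1 ≠ 0 then PySem.Int.bxor key (i >>> (1 : Nat)) else i >>> (1 : Nat)

-- table entry for byte b: the 8-step transform applied to b
def cfkByte (key : Int) (b : Int) : Int :=
  (List.range 8).foldl (fun i _ => cfkStep key i) b

def calculate_final_key_alt (key : Int) (password : String) : Int :=
  if password.toList = [] then 0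
  else
    let table := (List.range 256).map (fun (b : Nat) => cfkByte key (b : Int))
    let temp := password.toList.foldl (fun temp ch =>
      let x := PySem.Int.bxor temp ((ch.toNat : Int))
      PySem.Int.bxor (x >>> (8 : Nat)) (table.getD (PySem.Int.band x 255).toNat 0)) 0xFFFFFFFF
    PySem.Int.band (Int.not temp) 0xFFFFFFFF

-- ===== PRECONDITION & SPEC =====
def Spec_calculate_final_key (key : Int) (password : String) (out : Int) : Prop := out = calculate_final_key_alt key password
instance (key : Int) (password : String) (out : Int) : Decidable (Spec_calculate_final_key key password out) := by unfold Spec_calculate_final_key; infer_instance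

-- ===== CLAIM (what is proved, stated in full; the proofs are below) =====
def Claim_equal_calculate_final_key : Prop := ∀ (key : Int) (password : String), Dom_calculate_final_key key password → Spec_calculate_final_key key password (calculate_final_key key password)

-- ===== LEMMAS AND PROOFS =====

-- bridges from PySem's Python-exact bitwise ops to Mathlib's Int.xor / %
theorem pv_bxor_eq (a b : Int) : PySem.Int.bxor a b = Int.xor a b := by
  unfold PySem.Int.bxor
  cases a with
  | ofNat m => cases b with
    | ofNat n => simp [Int.xor]
    | negSucc n => simp [Int.xor, Int.negSucc_eq]; omega
  | negSucc m => cases b with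
    | ofNat n => simp [Int.xor, Int.negSucc_eq]; omega
    | negSucc n => simp [Int.xor, Int.negSucc_eq]; omega

theorem pv_band_255 (x : Int) : PySem.Int.band x 255 = x % 256 := by
  unfold PySem.Int.band
  cases x with
  | ofNat m =>
      simp only [Int.ofNat_eq_natCast]
      rw [if_pos (Int.natCast_nonneg m), if_pos (by norm_num)]
      have h : ((m : Int)).toNat &&& (255 : Int).toNat = m % 256 := by
        show m &&& 255 = m % 256
        exact Nat.and_two_pow_sub_one_eq_mod m 8
      rw [h]; omega
  | negSucc m =>
      rw [if_neg (by omega), if_pos (by norm_num)]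
      have h : (255 : Int).toNat &&& (-(Int.negSucc m) - 1).toNat = m % 256 := by
        have e : (-(Int.negSucc m) - 1).toNat = m := by
          simp only [Int.negSucc_eq]; omega
        rw [e]
        show 255 &&& m = m % 256
        rw [Nat.and_comm]; exact Nat.and_two_pow_sub_one_eq_mod m 8
      rw [h]
      have e2 : Int.negSucc m = -(m : Int) - 1 := by simp only [Int.negSucc_eq]; ring
      rw [e2]; omega

theorem pv_xor_zero (a : Int) : Int.xor a 0 = a := by
  cases a <;> simp [Int.xor]

theorem pv_xor_left_comm (a b c : Int) : Int.xor a (Int.xor b c) = Int.xor b (Int.xor a c) := by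
  cases a <;> cases b <;> cases c <;> simp [Int.xor, Nat.xor_left_comm]

theorem pv_bit_shiftRight_one (b : Bool) (m : Int) : (Int.bit b m) >>> (1 : Nat) = m := by
  have h1 : (Int.bit b m) >>> (1 : Nat) = (Int.bit b m) / 2 := by
    have := Int.shiftRight_eq_div_pow (Int.bit b m) 1
    norm_num at this; exact this
  rw [h1, Int.bit_val]; cases b <;> simp <;> omega

theorem pv_bit_mod_two (b : Bool) (m : Int) : (Int.bit b m) % 2 = if b then 1 else 0 := by
  rw [Int.bit_val]; cases b <;> simp

theorem pv_band_one_bit (b : Bool) (m : Int) : PySem.Int.band (Int.bit b m) 1 = if b then 1 else 0 := by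
  rw [PySem.Int.band_one, PySem.Int.mod_eq_emod_of_pos (by norm_num), pv_bit_mod_two]

-- cfkStep on a bit decomposition
theorem pv_step_bit (key : Int) (b : Bool) (m : Int) :
    cfkStep key (Int.bit b m) = if b then Int.xor key m else m := by
  unfold cfkStep
  rw [pv_band_one_bit, pv_bit_shiftRight_one, pv_bxor_eq]
  cases b <;> simp

-- the step is GF(2)-linear against an even high part
theorem pv_step_two_mul_xor (key h c : Int) :
    cfkStep key (Int.xor (2 * h) c) = Int.xor h (cfkStep key c) := by
  have h2 : (2 : Int) * h = Int.bit false h := by rw [Int.bit_val]; simp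
  conv_lhs => rw [h2, ← Int.bit_decomp c, Int.lxor_bit]
  conv_rhs => rw [← Int.bit_decomp c]
  rw [pv_step_bit, pv_step_bit]
  cases hb : c.bodd <;> simp [pv_xor_left_comm]

-- proof-side form of the 8-step loop
def cfkIter (key : Int) : Nat → Int → Int
  | 0, i => i
  | n + 1, i => cfkStep key (cfkIter key n i)

theorem pv_range_foldl_iter (key : Int) (n : Nat) (i : Int) :
    (List.range n).foldl (fun i _ => cfkStep key i) i = cfkIter key n i := by
  induction n with
  | zero => rfl
  | succ n ih => rw [List.range_succ, List.foldl_append, ih]; rfl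

-- main linearity: n iterations ignore a high part that is a multiple of 2^n, shifting it out
theorem pv_iter_xor_high (key : Int) (n : Nat) (h b : Int) :
    cfkIter key n (Int.xor ((2 ^ n : Int) * h) b) = Int.xor h (cfkIter key n b) := by
  induction n generalizing h with
  | zero => simp [cfkIter]
  | succ n ih =>
      have e : (2 ^ (n + 1) : Int) * h = (2 ^ n : Int) * (2 * h) := by ring
      show cfkStep key (cfkIter key n (Int.xor ((2 ^ (n + 1) : Int) * h) b)) = _
      rw [e, ih (2 * h), pv_step_two_mul_xor]
      rfl

-- xor with a low part in range is addition
theorem pv_xor_pow_add (k : Nat) (h l : Int) (h0 : 0 ≤ l) (h1 : l < 2 ^ k) :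
    Int.xor ((2 ^ k : Int) * h) l = (2 ^ k : Int) * h + l := by
  induction k generalizing h l with
  | zero =>
      have hl : l = 0 := by omega
      subst hl; rw [pv_xor_zero]; ring
  | succ k ih =>
      have hb := Int.bodd_add_div2 l
      have hd : l.div2 = l / 2 := Int.div2_val l
      have hpow : (2 : Int) ^ (k + 1) = 2 * 2 ^ k := by ring
      have hb0 : 0 ≤ l.div2 := by rw [hd]; omega
      have hb1 : l.div2 < 2 ^ k := by rw [hd]; omega
      have e : (2 ^ (k + 1) : Int) * h = Int.bit false ((2 ^ k : Int) * h) := by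
        rw [Int.bit_val]; simp; ring
      rw [e, ← Int.bit_decomp l, Int.lxor_bit]
      simp only [Bool.false_xor]
      rw [ih h l.div2 hb0 hb1]
      rw [Int.bit_val, Int.bit_val, Int.bit_val]
      cases hc : l.bodd <;> simp <;> ring

-- per-input identity behind the table lookup
theorem pv_iter_split (key : Int) (x : Int) :
    cfkIter key 8 x = Int.xor (x >>> (8 : Nat)) (cfkIter key 8 (x % 256)) := by
  have h0 : 0 ≤ x % 256 := Int.emod_nonneg x (by norm_num)
  have h1 : x % 256 < 256 := Int.emod_lt_of_pos x (by norm_num)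
  have hx : Int.xor ((2 ^ 8 : Int) * (x / 256)) (x % 256) = x := by
    rw [pv_xor_pow_add 8 (x / 256) (x % 256) h0 (by norm_num [h1])]
    norm_num
    omega
  have hs : x >>> (8 : Nat) = x / 256 := by
    have := Int.shiftRight_eq_div_pow x 8
    norm_num at this; exact this
  rw [hs]
  conv_lhs => rw [← hx]
  rw [pv_iter_xor_high key 8 (x / 256) (x % 256)]

-- A's paired inner loop computes cfkIter
theorem pv_gfun (key : Int) :
    (fun (st : Int × Int) (_ : Nat) =>
      let t := PySem.Int.bxor key (st.2 >>> (1 : Nat))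
      let t := if PySem.Int.band st.2 1 = 0 then st.2 >>> (1 : Nat) else t
      ((t, t) : Int × Int))
    = fun (st : Int × Int) (_ : Nat) => (cfkStep key st.2, cfkStep key st.2) := by
  funext st x
  by_cases h : PySem.Int.band st.2 1 = 0 <;> simp [cfkStep, h]

theorem pv_pair_snd (key : Int) (n : Nat) (p : Int × Int) :
    (((List.range n).foldl (fun (st : Int × Int) (_ : Nat) =>
        (cfkStep key st.2, cfkStep key st.2)) p).2) = cfkIter key n p.2 := by
  induction n with
  | zero => rfl
  | succ n ih =>
      rw [List.range_succ, List.foldl_append, List.foldl_cons, List.foldl_nil]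
      simpa [cfkIter] using congrArg (cfkStep key) ih

theorem pv_pair_fst8 (key : Int) (tk ik : Int) :
    (((List.range 8).foldl (fun (st : Int × Int) (_ : Nat) =>
        (cfkStep key st.2, cfkStep key st.2)) (tk, ik)).1) = cfkIter key 8 ik := by
  rw [show (8 : Nat) = 7 + 1 from rfl, List.range_succ, List.foldl_append,
    List.foldl_cons, List.foldl_nil]
  have h2 := pv_pair_snd key 7 (tk, ik)
  rw [show ((tk, ik) : Int × Int).2 = ik from rfl] at h2
  simpa [cfkIter] using congrArg (cfkStep key) h2

-- B's table lookup is cfkIter of the low byte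
theorem pv_table_lookup (key : Int) (x : Int) :
    (((List.range 256).map (fun (b : Nat) => cfkByte key (b : Int))).getD (PySem.Int.band x 255).toNat 0)
      = cfkIter key 8 (x % 256) := by
  rw [pv_band_255]
  have h0 : 0 ≤ x % 256 := Int.emod_nonneg x (by norm_num)
  have h1 : x % 256 < 256 := Int.emod_lt_of_pos x (by norm_num)
  have hlt : (x % 256).toNat < 256 := by omega
  rw [List.getD_eq_getElem _ _ (by rw [List.length_map, List.length_range]; exact hlt)]
  rw [List.getElem_map, List.getElem_range]
  rw [Int.toNat_of_nonneg h0]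
  exact pv_range_foldl_iter key 8 (x % 256)

-- the two per-character fold bodies agree
theorem pv_bodies (key : Int) :
    (fun (temp_key : Int) (char : Char) =>
        let intermediate_key := PySem.Int.bxor temp_key ((char.toNat : Int))
        let st := (List.range 8).foldl (fun (st : Int × Int) _ =>
          let t := PySem.Int.bxor key (st.2 >>> (1 : Nat))
          let t := if PySem.Int.band st.2 1 = 0 then st.2 >>> (1 : Nat) else t
          (t, t)) (temp_key, intermediate_key)
        st.1)
    = (fun (temp : Int) (ch : Char) =>
        let x := PySem.Int.bxor temp ((ch.toNat : Int))
        PySem.Int.bxor (x >>> (8 : Nat))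
          (((List.range 256).map (fun (b : Nat) => cfkByte key (b : Int))).getD (PySem.Int.band x 255).toNat 0)) := by
  funext temp c
  simp only [pv_gfun key]
  rw [pv_pair_fst8 key temp (PySem.Int.bxor temp ((c.toNat : Int)))]
  rw [pv_table_lookup key (PySem.Int.bxor temp ((c.toNat : Int)))]
  rw [pv_bxor_eq (PySem.Int.bxor temp ((c.toNat : Int)) >>> (8 : Nat))]
  exact pv_iter_split key (PySem.Int.bxor temp ((c.toNat : Int)))

-- ===== VERDICT (by name: the statement is the Claim_ definition above) =====
theorem calculate_final_key_spec : Claim_equal_calculate_final_key := by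
  intro key password _
  unfold Spec_calculate_final_key calculate_final_key calculate_final_key_alt
  by_cases hp : password.toList = []
  · simp [hp]
  · rw [if_neg hp, if_neg hp]
    rw [pv_bodies key]
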